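-- pv_equiv track=rewrite | github.com/bigzzodev/sxconsole | analytics/xxdashboard.py | _extract_year_data
-- ===== SOURCE A (Python) =====
-- def _extract_year_data(_year, _data):
--     class_keys = ["class_MENTION", "class_BAD", "class_GOOD", "class_MUSIC", "class_ENT",
--                   "class_CONTRACT", "class_AD", "class_RIP", "class_NO"]
--     year_data = {class_name: [0] * 12 for class_name in class_keys}
--     for entry in _data:
--         for month, info in entry.items():
--             entry_year, entry_month = month.split("-")
--             if entry_year == _year:
--                 month_index = int(entry_month) - 1
--                 for class_name in class_keys:
--                     year_data[class_name][month_index] = info["class_counts"].get(class_name, 0)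
--     data_list = [year_data[class_name][::-1] for class_name in class_keys]
--     return data_list
-- ===== SOURCE B (Python) =====
-- def _extract_year_data(_year, _data):
--     class_keys = ["class_MENTION", "class_BAD", "class_GOOD", "class_MUSIC", "class_ENT",
--                   "class_CONTRACT", "class_AD", "class_RIP", "class_NO"]
--     # Pass 1: collect the matching (month_index, class_counts) events in order.
--     events = []
--     for entry in _data:
--         for month, info in entry.items():
--             entry_year, entry_month = month.split("-")
--             if entry_year == _year:
--                 events.append((int(entry_month) - 1, info["class_counts"]))
--     # Pass 2: replay the events once per class to build that class's row.
--     rows = []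
--     for class_name in class_keys:
--         row = [0] * 12
--         for idx, counts in events:
--             row[idx] = counts.get(class_name, 0)
--         rows.append(row[::-1])
--     return rows
-- ===== Notes on version B (the rewrite author's own statement) =====
-- stated objective: alternative
-- what changed: A fills a per-class dict of 12-slot lists inside one fused triple-nested loop; B first extracts the ordered list of matching (month_index, class_counts) events, then builds each class's row in a separate per-class replay pass, swapping the loop nesting and splitting the fused fill into two phases.
import Mathlib
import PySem

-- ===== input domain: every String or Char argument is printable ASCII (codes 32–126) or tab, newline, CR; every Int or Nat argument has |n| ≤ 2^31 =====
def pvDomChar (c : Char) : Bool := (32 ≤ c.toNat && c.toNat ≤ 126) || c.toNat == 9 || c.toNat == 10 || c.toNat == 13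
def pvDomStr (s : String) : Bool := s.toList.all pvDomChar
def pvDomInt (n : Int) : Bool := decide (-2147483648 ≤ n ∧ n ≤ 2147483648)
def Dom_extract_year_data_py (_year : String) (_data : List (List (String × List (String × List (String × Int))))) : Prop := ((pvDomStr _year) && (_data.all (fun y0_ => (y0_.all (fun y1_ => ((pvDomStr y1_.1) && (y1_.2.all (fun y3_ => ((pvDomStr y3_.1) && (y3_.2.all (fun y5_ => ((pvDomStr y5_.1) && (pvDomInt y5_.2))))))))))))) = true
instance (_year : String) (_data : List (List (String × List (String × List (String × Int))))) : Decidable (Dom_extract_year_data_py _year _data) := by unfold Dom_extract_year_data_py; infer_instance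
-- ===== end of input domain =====

-- B restructures A: instead of A's fused triple-nested fill of a per-class dict of 12-lists,
-- B extracts the ordered (month_index, class_counts) event list once and then replays it per class.

def pvClassKeys : List String :=
  ["class_MENTION", "class_BAD", "class_GOOD", "class_MUSIC", "class_ENT",
   "class_CONTRACT", "class_AD", "class_RIP", "class_NO"]

-- ===== PORT A =====
-- A's loop body for one (month, info) item; the `_ => yd` arms are the inputs where the
-- Python raises (unpack/ValueError/KeyError/IndexError), all excluded by Pre_.
def pvStepA (_year : String) (yd : PySem.Dict String (List Int))
    (p : String × List (String × List (String × Int))) : PySem.Dict String (List Int) :=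
  match PySem.Str.split? p.1 "-" with
  | some [entry_year, entry_month] =>
    if entry_year = _year then
      match PySem.Int.ofStr? entry_month with
      | some n =>
        match (PySem.Dict.mk p.2).get? "class_counts" with
        | some counts =>
            pvClassKeys.foldl (fun d class_name =>
              d.modify class_name [] (fun row =>
                PySem.List.pySetD row (n - 1) ((PySem.Dict.mk counts).getD class_name 0))) yd
        | none => yd
      | none => yd
    else yd
  | _ => yd

def extract_year_data_py (_year : String) (_data : List (List (String × List (String × List (String × Int))))) : List (List Int) :=
  let init : PySem.Dict String (List Int) :=
    pvClassKeys.foldl (fun d k => d.insert k (List.replicate 12 (0 : Int))) (PySem.Dict.mk [])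
  let yd := _data.foldl (fun yd entry => entry.foldl (pvStepA _year) yd) init
  -- row[::-1] is reverse (PySem.List.slice?_none_none_neg_one)
  pvClassKeys.map (fun class_name => (yd.getD class_name []).reverse)

-- ===== PORT B =====
-- B pass 1 body: append the (month_index, class_counts) event; raising arms as in A.
def pvStepB (_year : String) (acc : List (Int × List (String × Int)))
    (p : String × List (String × List (String × Int))) : List (Int × List (String × Int)) :=
  match PySem.Str.split? p.1 "-" with
  | some [entry_year, entry_month] =>
    if entry_year = _year then
      match PySem.Int.ofStr? entry_month with
      | some n =>
        match (PySem.Dict.mk p.2).get? "class_counts" with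
        | some counts => acc ++ [(n - 1, counts)]
        | none => acc
      | none => acc
    else acc
  | _ => acc

def extract_year_data_py_alt (_year : String) (_data : List (List (String × List (String × List (String × Int))))) : List (List Int) :=
  let events := _data.foldl (fun acc entry => entry.foldl (pvStepB _year) acc) []
  pvClassKeys.foldl (fun rows class_name =>
    rows ++ [(events.foldl (fun row e =>
        PySem.List.pySetD row e.1 ((PySem.Dict.mk e.2).getD class_name 0))
      (List.replicate 12 (0 : Int))).reverse]) []

-- ===== PRECONDITION & SPEC =====
-- Pre_ is exactly the inputs where the Python A returns: every month key splits into two parts,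
-- and for the keys matching _year the month part parses as an int whose index-1 is a valid
-- 12-slot index and the info dict has a "class_counts" key.
def Pre_extract_year_data_py (_year : String) (_data : List (List (String × List (String × List (String × Int))))) : Prop :=
  ∀ entry ∈ _data, ∀ p ∈ entry,
    ((PySem.Str.split? p.1 "-").getD []).length = 2 ∧
    (((PySem.Str.split? p.1 "-").getD []).getD 0 "" = _year →
      (PySem.Int.ofStr? (((PySem.Str.split? p.1 "-").getD []).getD 1 "")).isSome ∧
      PySem.Raise.InRange 12 ((PySem.Int.ofStr? (((PySem.Str.split? p.1 "-").getD []).getD 1 "")).getD 0 - 1) ∧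
      ((PySem.Dict.mk p.2).get? "class_counts").isSome)
instance (_year : String) (_data : List (List (String × List (String × List (String × Int))))) : Decidable (Pre_extract_year_data_py _year _data) := by unfold Pre_extract_year_data_py; infer_instance

def pvWitness_extract_year_data_py : String × (List (List (String × List (String × List (String × Int))))) :=
  ("2020", [[("2020-3", [("class_counts", [("class_BAD", 5)])]), ("2019-4", [("class_counts", [])])]])

def Spec_extract_year_data_py (_year : String) (_data : List (List (String × List (String × List (String × Int))))) (out : List (List Int)) : Prop := out = extract_year_data_py_alt _year _data
instance (_year : String) (_data : List (List (String × List (String × List (String × Int))))) (out : List (List Int)) : Decidable (Spec_extract_year_data_py _year _data out) := by unfold Spec_extract_year_data_py; infer_instance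

-- ===== CLAIM (what is proved, stated in full; the proofs are below) =====
def Claim_equal_extract_year_data_py : Prop := ∀ (_year : String) (_data : List (List (String × List (String × List (String × Int))))), Dom_extract_year_data_py _year _data → Pre_extract_year_data_py _year _data → Spec_extract_year_data_py _year _data (extract_year_data_py _year _data)

-- ===== LEMMAS AND PROOFS =====

-- the (month_index, class_counts) event a single item contributes, if any
def pvEv (_year : String) (p : String × List (String × List (String × Int))) :
    Option (Int × List (String × Int)) :=
  match PySem.Str.split? p.1 "-" with
  | some [entry_year, entry_month] =>
    if entry_year = _year then
      (PySem.Int.ofStr? entry_month).bind (fun n =>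
        ((PySem.Dict.mk p.2).get? "class_counts").map (fun counts => (n - 1, counts)))
    else none
  | _ => none

-- what A does with one event
def pvApplyA (e : Int × List (String × Int)) (yd : PySem.Dict String (List Int)) :
    PySem.Dict String (List Int) :=
  pvClassKeys.foldl (fun d k =>
    d.modify k [] (fun row => PySem.List.pySetD row e.1 ((PySem.Dict.mk e.2).getD k 0))) yd

lemma pvStepA_eq_ev (_year : String) (yd : PySem.Dict String (List Int))
    (p : String × List (String × List (String × Int))) :
    pvStepA _year yd p = (pvEv _year p).elim yd (fun e => pvApplyA e yd) := by
  unfold pvStepA pvEv pvApplyA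
  rcases h : PySem.Str.split? p.1 "-" with _ | (_ | ⟨y, _ | ⟨m, _ | _⟩⟩) <;> simp
  split_ifs with hy
  · rcases hn : PySem.Int.ofStr? m with _ | n <;> simp
    rcases hc : (PySem.Dict.mk p.2).get? "class_counts" with _ | c <;> simp
  · rfl

lemma pvStepB_eq_ev (_year : String) (acc : List (Int × List (String × Int)))
    (p : String × List (String × List (String × Int))) :
    pvStepB _year acc p = (pvEv _year p).elim acc (fun e => acc ++ [e]) := by
  unfold pvStepB pvEv
  rcases h : PySem.Str.split? p.1 "-" with _ | (_ | ⟨y, _ | ⟨m, _ | _⟩⟩) <;> simp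
  split_ifs with hy
  · rcases hn : PySem.Int.ofStr? m with _ | n <;> simp
    rcases hc : (PySem.Dict.mk p.2).get? "class_counts" with _ | c <;> simp
  · rfl

-- folding an option-dispatch step is folding over the filterMap
lemma pv_foldl_opt {α β σ : Type} (f : α → Option β) (g : σ → β → σ) (l : List α) (s : σ) :
    l.foldl (fun s a => (f a).elim s (fun b => g s b)) s
      = (l.filterMap f).foldl g s := by
  induction l generalizing s with
  | nil => rfl
  | cons a l ih =>
    simp only [List.foldl_cons]
    rcases h : f a with _ | b <;> simp [h, ih]

-- a nodup modify-sweep over keys, read back at a member key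
lemma pv_keep {ν : Type} (f : String → List ν → List ν) (k : String)
    (l : List String) (d' : PySem.Dict String (List ν)) (hnl : k ∉ l) :
    (l.foldl (fun d k' => d.modify k' [] (f k')) d').getD k [] = d'.getD k [] := by
  induction l generalizing d' with
  | nil => rfl
  | cons a l ihl =>
    simp only [List.foldl_cons]
    rw [ihl _ (fun h => hnl (List.mem_cons_of_mem a h))]
    rw [PySem.Dict.getD_modify]
    have hka : k ≠ a := fun h => hnl (h ▸ List.mem_cons_self ..)
    simp [hka]

lemma pv_foldl_modify_getD {ν : Type} (ks : List String) (hnd : ks.Nodup)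
    (f : String → List ν → List ν) (d : PySem.Dict String (List ν)) (k : String) (hk : k ∈ ks) :
    (ks.foldl (fun d k' => d.modify k' [] (f k')) d).getD k [] = f k (d.getD k []) := by
  induction ks generalizing d with
  | nil => cases hk
  | cons k0 ks ih =>
    simp only [List.foldl_cons]
    rcases List.nodup_cons.mp hnd with ⟨hk0, hnd'⟩
    rcases List.mem_cons.mp hk with hk | hk
    · subst hk
      rw [pv_keep f k ks _ hk0, PySem.Dict.getD_modify]
      simp
    · rw [ih hnd' _ hk, PySem.Dict.getD_modify]
      have hne : k ≠ k0 := fun h => hk0 (h ▸ hk)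
      simp [hne]

lemma pv_nodup : pvClassKeys.Nodup := by decide

-- A's dict fold, projected to one class, is B's row replay
lemma pv_project (E : List (Int × List (String × Int))) (d : PySem.Dict String (List Int))
    (k : String) (hk : k ∈ pvClassKeys) :
    (E.foldl (fun yd e => pvApplyA e yd) d).getD k []
      = E.foldl (fun row e => PySem.List.pySetD row e.1 ((PySem.Dict.mk e.2).getD k 0)) (d.getD k []) := by
  induction E generalizing d with
  | nil => rfl
  | cons e E ih =>
    simp only [List.foldl_cons]
    rw [ih (pvApplyA e d)]
    have hmod := pv_foldl_modify_getD pvClassKeys pv_nodup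
      (fun k' row => PySem.List.pySetD row e.1 ((PySem.Dict.mk e.2).getD k' 0)) d k hk
    unfold pvApplyA
    rw [hmod]

set_option maxHeartbeats 1600000 in
lemma pv_init_getD (k : String) (hk : k ∈ pvClassKeys) :
    ((pvClassKeys.foldl (fun d k => d.insert k (List.replicate 12 (0 : Int))) (PySem.Dict.mk [])).getD k [])
      = List.replicate 12 (0 : Int) := by
  simp only [pvClassKeys, List.mem_cons, List.not_mem_nil, or_false] at hk
  rcases hk with h | h | h | h | h | h | h | h | h <;> subst h <;> decide

-- ===== VERDICT (by name: the statement is the Claim_ definition above) =====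
theorem extract_year_data_py_spec : Claim_equal_extract_year_data_py := by
  intro _year _data _ _
  unfold Spec_extract_year_data_py extract_year_data_py extract_year_data_py_alt
  have hflat : ∀ {σ : Type} (step : σ → (String × List (String × List (String × Int))) → σ) (s : σ),
      _data.foldl (fun s entry => entry.foldl step s) s = _data.flatten.foldl step s := by
    intro σ step s
    rw [List.foldl_flatten]
  simp only [hflat]
  have hA : _data.flatten.foldl (pvStepA _year)
        (pvClassKeys.foldl (fun d k => d.insert k (List.replicate 12 (0 : Int))) (PySem.Dict.mk []))
      = (_data.flatten.filterMap (pvEv _year)).foldl (fun yd e => pvApplyA e yd)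
        (pvClassKeys.foldl (fun d k => d.insert k (List.replicate 12 (0 : Int))) (PySem.Dict.mk [])) := by
    rw [← pv_foldl_opt (pvEv _year) (fun yd e => pvApplyA e yd)]
    exact PySem.List.foldl_congr_mem _ _ _ _ (fun s p _ => pvStepA_eq_ev _year s p)
  have hB : _data.flatten.foldl (pvStepB _year) []
      = _data.flatten.filterMap (pvEv _year) := by
    have h1 : _data.flatten.foldl (pvStepB _year) []
        = (_data.flatten.filterMap (pvEv _year)).foldl (fun acc e => acc ++ [e]) [] := by
      rw [← pv_foldl_opt (pvEv _year) (fun acc e => acc ++ [e])]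
      exact PySem.List.foldl_congr_mem _ _ _ _ (fun s p _ => pvStepB_eq_ev _year s p)
    rw [h1, PySem.List.foldl_append_singleton, List.nil_append]
  rw [hA, hB]
  rw [PySem.List.foldl_append_singleton_eq_map]
  simp only [List.nil_append]
  apply List.map_congr_left
  intro k hk
  rw [pv_project _ _ k hk, pv_init_getD k hk]
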